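-- pv_equiv track=rewrite | github.com/KishorKumarBabu/DSA-Learning | assignmentweek4/q2.py | onehop
-- ===== SOURCE A (Python) =====
-- def onehop(l):
--     from collections import defaultdict
--     adjacency=defaultdict(set)
--     for start,end in l:
--         adjacency[start].add(end)
--     result=set()
--     for i in list(adjacency.keys()):
--         for k in adjacency[i]:
--             for j in adjacency[k]:
--                 if i!=j:
--                     result.add((i,j))
--     return sorted(result)
-- ===== SOURCE B (Python) =====
-- def onehop(l):
--     # Sort-merge join: the edge list sorted by end is joined with the edge list
--     # sorted by start on the shared middle node; the matched (source, dest)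
--     # pairs (minus the diagonal) are deduplicated and returned sorted.
--     e1 = sorted(l, key=lambda p: p[1])
--     e2 = sorted(l, key=lambda p: p[0])
--     n, m = len(e1), len(e2)
--     pairs = []
--     i = j = 0
--     while i < n and j < m:
--         k1 = e1[i][1]
--         k2 = e2[j][0]
--         if k1 < k2:
--             i += 1
--         elif k2 < k1:
--             j += 1
--         else:
--             i2 = i
--             while i2 < n and e1[i2][1] == k1:
--                 i2 += 1
--             j2 = j
--             while j2 < m and e2[j2][0] == k1:
--                 j2 += 1
--             for a in range(i, i2):
--                 for b in range(j, j2):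
--                     if e1[a][0] != e2[b][1]:
--                         pairs.append((e1[a][0], e2[b][1]))
--             i, j = i2, j2
--     return sorted(set(pairs))
-- ===== Notes on version B (the rewrite author's own statement) =====
-- stated objective: alternative
-- what changed: A walks a hash adjacency index over all source->middle->dest triples and dedups into a set; B performs a sort-merge join (edge list sorted by end merged with the edge list sorted by start on the middle node, emitting per-block Cartesian products) followed by a sort of the distinct pairs.
import Mathlib
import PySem

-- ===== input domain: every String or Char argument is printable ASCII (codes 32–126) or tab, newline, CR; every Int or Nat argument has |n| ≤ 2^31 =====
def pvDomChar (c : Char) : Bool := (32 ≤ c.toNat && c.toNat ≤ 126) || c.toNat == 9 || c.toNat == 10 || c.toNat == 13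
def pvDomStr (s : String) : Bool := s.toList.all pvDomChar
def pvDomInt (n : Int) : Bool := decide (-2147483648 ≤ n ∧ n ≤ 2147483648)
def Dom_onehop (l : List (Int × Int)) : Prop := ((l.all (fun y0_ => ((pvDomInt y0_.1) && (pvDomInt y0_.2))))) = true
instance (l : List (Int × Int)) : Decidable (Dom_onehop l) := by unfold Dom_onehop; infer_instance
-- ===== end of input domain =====

-- B replaces A's hash-index walk over source->middle->dest triples by a sort-merge
-- join of the edge list with itself on the middle node (alternative algorithm).

-- ===== PORT A =====
-- 'adjacency[k]' on the defaultdict may insert a fresh empty entry, but the key list was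
-- snapshotted before the loop and a fresh entry is empty, so every read equals getD _ ∅: exact.
-- The sets are consumed only into a set that is then sorted by the (injective) full-tuple key,
-- so the unmodelled hash iteration order cannot affect the result.
def onehop (l : List (Int × Int)) : List (Int × Int) :=
  let adjacency : PySem.Dict Int (PySem.Set Int) :=
    l.foldl (fun d p => d.modify p.1 PySem.Set.empty (fun s => PySem.Set.add s p.2)) PySem.Dict.empty
  let result : PySem.Set (Int × Int) :=
    adjacency.keys.foldl (fun r i =>
      (adjacency.getD i PySem.Set.empty).foldl (fun r k =>
        (adjacency.getD k PySem.Set.empty).foldl (fun r j =>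
          if i ≠ j then PySem.Set.add r (i, j) else r) r) r) PySem.Set.empty
  -- sorted(result): Python's tuple order is lexicographic = the Prod.Lex order on Int × Int
  PySem.List.sorted result (fun p => (toLex p : Int ×ₗ Int))

-- ===== PORT B =====
-- the while loop of Source B: the index state (i, j) into the two fixed sorted arrays is
-- represented by the corresponding suffixes; the inner advance-while loops are
-- takeWhile/dropWhile on the suffix (same comparisons, same order of emitted pairs)
def pvJoin (e1 e2 : List (Int × Int)) : List (Int × Int) :=
  match e1, e2 with
  | [], _ => []
  | _ :: _, [] => []
  | a :: t1, b :: t2 =>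
    if a.2 < b.1 then pvJoin t1 (b :: t2)
    else if b.1 < a.2 then pvJoin (a :: t1) t2
    else
      let b1 := (a :: t1).takeWhile (fun p => p.2 == a.2)
      let r1 := (a :: t1).dropWhile (fun p => p.2 == a.2)
      let b2 := (b :: t2).takeWhile (fun p => p.1 == a.2)
      let r2 := (b :: t2).dropWhile (fun p => p.1 == a.2)
      (b1.flatMap (fun p => (b2.filter (fun q => p.1 ≠ q.2)).map (fun q => (p.1, q.2)))) ++
        pvJoin r1 r2
termination_by e1.length + e2.length
decreasing_by
  · simp
  · simp
  · have hh1 : ((a :: t1).dropWhile (fun p => p.2 == a.2)).length ≤ t1.length := by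
      simp only [List.dropWhile_cons, BEq.rfl, if_pos]
      exact List.length_dropWhile_le _ _
    have hh2 : ((b :: t2).dropWhile (fun p => p.1 == a.2)).length ≤ (b :: t2).length :=
      List.length_dropWhile_le _ _
    simp only [List.length_cons] at *
    omega

def onehop_alt (l : List (Int × Int)) : List (Int × Int) :=
  let e1 := PySem.List.sorted l (fun p => p.2)
  let e2 := PySem.List.sorted l (fun p => p.1)
  let pairs := pvJoin e1 e2
  PySem.List.sorted (PySem.Set.ofList pairs) (fun p => (toLex p : Int ×ₗ Int))

-- ===== PRECONDITION & SPEC =====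
def Spec_onehop (l : List (Int × Int)) (out : List (Int × Int)) : Prop := out = onehop_alt l
instance (l : List (Int × Int)) (out : List (Int × Int)) : Decidable (Spec_onehop l out) := by unfold Spec_onehop; infer_instance

-- ===== CLAIM (what is proved, stated in full; the proofs are below) =====
def Claim_equal_onehop : Prop := ∀ (l : List (Int × Int)), Dom_onehop l → Spec_onehop l (onehop l)

-- ===== LEMMAS AND PROOFS =====

-- the canonical description of the answer set
def TwoHop (l : List (Int × Int)) (y : Int × Int) : Prop :=
  ∃ i k j : Int, (i, k) ∈ l ∧ (k, j) ∈ l ∧ y = (i, j) ∧ i ≠ j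

-- ---- A-side: the result set holds exactly the two-hop pairs, without duplicates ----

theorem getD_group_mem (f g : Int × Int → Int) (l : List (Int × Int))
    (d : PySem.Dict Int (PySem.Set Int)) (k v : Int) :
    v ∈ (l.foldl (fun d p => d.modify (f p) PySem.Set.empty (fun s => PySem.Set.add s (g p))) d).getD k PySem.Set.empty
    ↔ v ∈ d.getD k PySem.Set.empty ∨ ∃ p ∈ l, f p = k ∧ g p = v := by
  induction l generalizing d with
  | nil => simp
  | cons p t ih =>
    simp only [List.foldl_cons, ih, PySem.Dict.getD_modify, List.mem_cons]
    by_cases h : k = f p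
    · subst h
      simp [PySem.Set.mem_add]
      tauto
    · simp [h, Ne.symm h]

-- the innermost loop: 'for j in S: if i != j: result.add((i, j))'
theorem mem_pairFold (S : List Int) (i : Int) (r : PySem.Set (Int × Int)) (y : Int × Int) :
    y ∈ S.foldl (fun r j => if i ≠ j then PySem.Set.add r (i, j) else r) r
    ↔ y ∈ r ∨ ∃ j ∈ S, y = (i, j) ∧ i ≠ j := by
  induction S generalizing r with
  | nil => simp
  | cons j t ih =>
    simp only [List.foldl_cons, ih]
    by_cases h : i ≠ j
    · simp [h, PySem.Set.mem_add]
      tauto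
    · simp [h]

-- A's middle+inner loops over a key-dependent neighbour list g
theorem mem_midFold (g : Int → List Int) (ks : List Int) (i : Int)
    (r : PySem.Set (Int × Int)) (y : Int × Int) :
    y ∈ ks.foldl (fun r k => (g k).foldl (fun r j => if i ≠ j then PySem.Set.add r (i, j) else r) r) r
    ↔ y ∈ r ∨ ∃ k ∈ ks, ∃ j ∈ g k, y = (i, j) ∧ i ≠ j := by
  induction ks generalizing r with
  | nil => simp
  | cons k t ih =>
    simp only [List.foldl_cons, ih, mem_pairFold, List.mem_cons]
    aesop

-- A's full triple loop
theorem mem_outFoldA (g : Int → List Int) (is : List Int)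
    (r : PySem.Set (Int × Int)) (y : Int × Int) :
    y ∈ is.foldl (fun r i => (g i).foldl (fun r k => (g k).foldl (fun r j => if i ≠ j then PySem.Set.add r (i, j) else r) r) r) r
    ↔ y ∈ r ∨ ∃ i ∈ is, ∃ k ∈ g i, ∃ j ∈ g k, y = (i, j) ∧ i ≠ j := by
  induction is generalizing r with
  | nil => simp
  | cons i t ih =>
    simp only [List.foldl_cons, ih, mem_midFold, List.mem_cons]
    aesop

-- a fold whose step preserves Nodup preserves Nodup
theorem nodup_foldl_pres {β : Type} (f : PySem.Set (Int × Int) → β → PySem.Set (Int × Int))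
    (h : ∀ r b, r.Nodup → (f r b).Nodup) (l : List β) (r : PySem.Set (Int × Int))
    (hr : r.Nodup) : (l.foldl f r).Nodup := by
  induction l generalizing r with
  | nil => exact hr
  | cons b t ih => exact ih _ (h _ _ hr)

theorem nodup_pairFold (S : List Int) (i : Int) (r : PySem.Set (Int × Int)) (hr : r.Nodup) :
    (S.foldl (fun r j => if i ≠ j then PySem.Set.add r (i, j) else r) r).Nodup := by
  refine nodup_foldl_pres _ (fun r j hrn => ?_) S r hr
  by_cases h : i ≠ j <;> simp [h, PySem.Set.nodup_add, hrn]

theorem nodup_resA (g : Int → List Int) (is : List Int) :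
    (is.foldl (fun r i => (g i).foldl (fun r k => (g k).foldl
      (fun r j => if i ≠ j then PySem.Set.add r (i, j) else r) r) r) (PySem.Set.empty : PySem.Set (Int × Int))).Nodup := by
  refine nodup_foldl_pres _ (fun r i h => ?_) is _ (by simp [PySem.Set.empty])
  exact nodup_foldl_pres _ (fun r k h => nodup_pairFold _ _ _ h) _ _ h

-- the grouping fold from the empty dict: lookup and keys
theorem mem_group_empty (f g : Int × Int → Int) (l : List (Int × Int)) (k v : Int) :
    v ∈ (l.foldl (fun d p => d.modify (f p) PySem.Set.empty (fun s => PySem.Set.add s (g p))) PySem.Dict.empty).getD k PySem.Set.empty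
    ↔ ∃ p ∈ l, f p = k ∧ g p = v := by
  rw [getD_group_mem]
  simp [PySem.Dict.getD_empty, PySem.Set.empty]

theorem keys_group_empty (f g : Int × Int → Int) (l : List (Int × Int)) (k : Int) :
    k ∈ (l.foldl (fun d p => d.modify (f p) PySem.Set.empty (fun s => PySem.Set.add s (g p))) PySem.Dict.empty).keys
    ↔ ∃ p ∈ l, f p = k := by
  rw [PySem.Dict.keys_foldl_modify_key l f PySem.Set.empty (fun _ p s => PySem.Set.add s (g p)),
      PySem.Dict.keys_empty, PySem.Set.update_nil_left]
  simp [PySem.Set.mem_ofList, eq_comm]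

-- A's result set holds exactly the two-hop pairs
theorem mem_resA (l : List (Int × Int)) (y : Int × Int) :
    y ∈ ((l.foldl (fun d p => d.modify p.1 PySem.Set.empty (fun s => PySem.Set.add s p.2)) PySem.Dict.empty).keys.foldl
          (fun r i =>
            ((l.foldl (fun d p => d.modify p.1 PySem.Set.empty (fun s => PySem.Set.add s p.2)) PySem.Dict.empty).getD i PySem.Set.empty).foldl
              (fun r k =>
                ((l.foldl (fun d p => d.modify p.1 PySem.Set.empty (fun s => PySem.Set.add s p.2)) PySem.Dict.empty).getD k PySem.Set.empty).foldl
                  (fun r j => if i ≠ j then PySem.Set.add r (i, j) else r) r) r) PySem.Set.empty)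
    ↔ TwoHop l y := by
  rw [mem_outFoldA]
  unfold TwoHop
  constructor
  · rintro (h | ⟨i, hi, k, hk, j, hj, rfl, hne⟩)
    · simp [PySem.Set.empty] at h
    · refine ⟨i, k, j, ?_, ?_, rfl, hne⟩
      · rcases (mem_group_empty Prod.fst Prod.snd l i k).1 hk with ⟨⟨a, b⟩, hp, h1, h2⟩
        simp at h1 h2; subst h1; subst h2; exact hp
      · rcases (mem_group_empty Prod.fst Prod.snd l k j).1 hj with ⟨⟨a, b⟩, hp, h1, h2⟩
        simp at h1 h2; subst h1; subst h2; exact hp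
  · rintro ⟨i, k, j, hik, hkj, rfl, hne⟩
    refine Or.inr ⟨i, ?_, k, ?_, j, ?_, rfl, hne⟩
    · exact (keys_group_empty Prod.fst Prod.snd l i).2 ⟨(i, k), hik, rfl⟩
    · exact (mem_group_empty Prod.fst Prod.snd l i k).2 ⟨(i, k), hik, rfl, rfl⟩
    · exact (mem_group_empty Prod.fst Prod.snd l k j).2 ⟨(k, j), hkj, rfl, rfl⟩

-- ---- B-side: the merge join emits exactly the joined pairs ----

-- every element of the dropWhile suffix of a key-sorted list has a strictly larger key
theorem key_dropWhile_gt (f : Int × Int → Int) (k : Int) (e : List (Int × Int))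
    (hs : e.Pairwise (fun a b => f a ≤ f b)) (hk : ∀ p ∈ e, k ≤ f p) :
    ∀ p ∈ e.dropWhile (fun p => f p == k), k < f p := by
  induction e with
  | nil => simp
  | cons a t ih =>
    intro p hp
    rw [List.dropWhile_cons] at hp
    by_cases h : f a == k
    · rw [if_pos h] at hp
      exact ih hs.tail (fun q hq => hk q (List.mem_cons_of_mem _ hq)) p hp
    · rw [if_neg h] at hp
      have h1 : k ≤ f a := hk a List.mem_cons_self
      have h2 : f a ≠ k := by simpa using h
      rcases List.mem_cons.1 hp with rfl | hp
      · omega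
      · have := List.rel_of_pairwise_cons hs hp
        omega

-- the join-membership characterisation, by the recursion of pvJoin
theorem mem_pvJoin (e1 e2 : List (Int × Int))
    (h1 : e1.Pairwise (fun a b => a.2 ≤ b.2)) (h2 : e2.Pairwise (fun a b => a.1 ≤ b.1))
    (y : Int × Int) :
    y ∈ pvJoin e1 e2 ↔ ∃ a ∈ e1, ∃ b ∈ e2, a.2 = b.1 ∧ y = (a.1, b.2) ∧ a.1 ≠ b.2 := by
  induction e1, e2 using pvJoin.induct with
  | case1 e2 => simp [pvJoin]
  | case2 e1 h =>
    simp [pvJoin]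
  | case3 a t1 b t2 hlt ih =>
    rw [pvJoin, if_pos hlt, ih h1.tail h2]
    constructor
    · rintro ⟨p, hp, q, hq, hh⟩
      exact ⟨p, List.mem_cons_of_mem _ hp, q, hq, hh⟩
    · rintro ⟨p, hp, q, hq, heq, hy, hne⟩
      rcases List.mem_cons.1 hp with rfl | hp
      · -- the dropped head cannot match: p.2 = a.2 < b.1 ≤ q.1
        exfalso
        rcases List.mem_cons.1 hq with rfl | hq
        · omega
        · have := List.rel_of_pairwise_cons h2 hq
          omega
      · exact ⟨p, hp, q, hq, heq, hy, hne⟩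
  | case4 a t1 b t2 hlt hgt ih =>
    rw [pvJoin, if_neg hlt, if_pos hgt, ih h1 h2.tail]
    constructor
    · rintro ⟨p, hp, q, hq, hh⟩
      exact ⟨p, hp, q, List.mem_cons_of_mem _ hq, hh⟩
    · rintro ⟨p, hp, q, hq, heq, hy, hne⟩
      rcases List.mem_cons.1 hq with rfl | hq
      · exfalso
        rcases List.mem_cons.1 hp with rfl | hp
        · omega
        · have := List.rel_of_pairwise_cons h1 hp
          omega
      · exact ⟨p, hp, q, hq, heq, hy, hne⟩
  | case5 a t1 b t2 hlt hgt r1' r2' ih =>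
    have hk : a.2 = b.1 := by omega
    rw [pvJoin, if_neg hlt, if_neg hgt]
    simp only [List.mem_append, List.mem_flatMap, List.mem_map, List.mem_filter]
    have hkey1 : ∀ p ∈ (a :: t1), a.2 ≤ p.2 := by
      intro p hp
      rcases List.mem_cons.1 hp with rfl | hp
      · omega
      · exact List.rel_of_pairwise_cons h1 hp
    have hkey2 : ∀ p ∈ (b :: t2), a.2 ≤ p.1 := by
      intro p hp
      rcases List.mem_cons.1 hp with rfl | hp
      · omega
      · have := List.rel_of_pairwise_cons h2 hp
        omega
    have hr1 : ∀ p ∈ (a :: t1).dropWhile (fun p => p.2 == a.2), a.2 < p.2 :=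
      key_dropWhile_gt Prod.snd a.2 _ h1 hkey1
    have hr2 : ∀ p ∈ (b :: t2).dropWhile (fun p => p.1 == a.2), a.2 < p.1 :=
      key_dropWhile_gt Prod.fst a.2 _ h2 hkey2
    have hb1 : ∀ p ∈ (a :: t1).takeWhile (fun p => p.2 == a.2), p.2 = a.2 := by
      intro p hp
      simpa using List.mem_takeWhile_imp hp
    have hb2 : ∀ p ∈ (b :: t2).takeWhile (fun p => p.1 == a.2), p.1 = a.2 := by
      intro p hp
      simpa using List.mem_takeWhile_imp hp
    rw [ih (h1.sublist (List.dropWhile_sublist _)) (h2.sublist (List.dropWhile_sublist _))]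
    constructor
    · rintro (⟨p, hp, q, ⟨hq, hne⟩, hy⟩ | ⟨p, hp, q, hq, heq, hy, hne⟩)
      · refine ⟨p, (List.takeWhile_sublist _).mem hp, q, (List.takeWhile_sublist _).mem hq,
          by rw [hb1 p hp, hb2 q hq], hy.symm, by simpa using hne⟩
      · exact ⟨p, (List.dropWhile_sublist _).mem hp, q, (List.dropWhile_sublist _).mem hq,
          heq, hy, hne⟩
    · rintro ⟨p, hp, q, hq, heq, hy, hne⟩
      -- split each membership into the block or the rest, using takeWhile ++ dropWhile = id
      have hsplit1 := (List.takeWhile_append_dropWhile (p := fun p => p.2 == a.2) (l := a :: t1))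
      have hsplit2 := (List.takeWhile_append_dropWhile (p := fun p => p.1 == a.2) (l := b :: t2))
      rw [← hsplit1, List.mem_append] at hp
      rw [← hsplit2, List.mem_append] at hq
      rcases hp with hp | hp
      · rcases hq with hq | hq
        · exact Or.inl ⟨p, hp, q, ⟨hq, by simpa using hne⟩, hy.symm⟩
        · exfalso
          have := hr2 q hq
          have := hb1 p hp
          omega
      · rcases hq with hq | hq
        · exfalso
          have := hr1 p hp
          have := hb2 q hq
          omega
        · exact Or.inr ⟨p, hp, q, hq, heq, hy, hne⟩

-- ===== VERDICT (by name: the statement is the Claim_ definition above) =====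
theorem onehop_spec : Claim_equal_onehop := by
  intro l _
  show onehop l = onehop_alt l
  simp only [onehop, onehop_alt]
  refine PySem.List.sorted_eq_sorted_of_perm _ _ _ toLex.injective ?_
  refine (List.perm_ext_iff_of_nodup
      (nodup_resA
        (fun k => (l.foldl (fun d p => d.modify p.1 PySem.Set.empty (fun s => PySem.Set.add s p.2)) PySem.Dict.empty).getD k PySem.Set.empty)
        (l.foldl (fun d p => d.modify p.1 PySem.Set.empty (fun s => PySem.Set.add s p.2)) PySem.Dict.empty).keys)
      (PySem.Set.nodup_ofList _)).2 (fun y => ?_)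
  rw [mem_resA l y, PySem.Set.mem_ofList,
      mem_pvJoin _ _ (PySem.List.sorted_pairwise l (fun p => p.2))
        (PySem.List.sorted_pairwise l (fun p => p.1)) y]
  unfold TwoHop
  constructor
  · rintro ⟨i, k, j, hik, hkj, rfl, hne⟩
    exact ⟨(i, k), (PySem.List.mem_sorted _ _ _ _).2 hik, (k, j), (PySem.List.mem_sorted _ _ _ _).2 hkj,
      rfl, rfl, hne⟩
  · rintro ⟨⟨i, k⟩, ha, ⟨k', j⟩, hb, heq, rfl, hne⟩
    simp only at heq hne
    subst heq
    exact ⟨i, k, j, (PySem.List.mem_sorted _ _ _ _).1 ha, (PySem.List.mem_sorted _ _ _ _).1 hb, rfl, hne⟩
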